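-- pv_equiv track=rewrite | github.com/YuntianCheng/Leetcode | m_4_2.py | solution
-- ===== SOURCE A (Python) =====
-- def solution(A, M):
--     # write your code in Python (Python 3.6)
--     A.sort()
--     max = A[-1]
--     count = 0
--     for i in range(len(A)):
--         tmp = A[i]
--         tmp_index = i + 1
--         tmp_count = 1
--         while tmp <= max:
--             if A[tmp_index:].count(tmp) > 0:
--                 tmp_count += 1
--                 tmp_index = A[tmp_index:].index(tmp) + tmp_index + 1
--             else:
--                 tmp += M
--         count = tmp_count if tmp_count > count else count
--     return count
-- ===== SOURCE B (Python) =====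
-- def solution(A, M):
--     # Elements reachable from a start a by repeatedly adding M are exactly the
--     # elements sharing a's residue mod M that are >= a; starting from the class
--     # minimum reaches the whole class, so the answer is the size of the largest
--     # residue class mod M.
--     freq = {}
--     for a in A:
--         r = a % M
--         freq[r] = freq.get(r, 0) + 1
--     return max(freq.values())
-- ===== Notes on version B (the rewrite author's own statement) =====
-- stated objective: faster
-- what changed: Replaces sort plus per-start while-loop suffix scans (count/index on slices while stepping by M) by a single pass counting residues mod M and returning the largest class size, using the fact that a chain starting at the minimum of a residue class collects the whole class.
import Mathlib
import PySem

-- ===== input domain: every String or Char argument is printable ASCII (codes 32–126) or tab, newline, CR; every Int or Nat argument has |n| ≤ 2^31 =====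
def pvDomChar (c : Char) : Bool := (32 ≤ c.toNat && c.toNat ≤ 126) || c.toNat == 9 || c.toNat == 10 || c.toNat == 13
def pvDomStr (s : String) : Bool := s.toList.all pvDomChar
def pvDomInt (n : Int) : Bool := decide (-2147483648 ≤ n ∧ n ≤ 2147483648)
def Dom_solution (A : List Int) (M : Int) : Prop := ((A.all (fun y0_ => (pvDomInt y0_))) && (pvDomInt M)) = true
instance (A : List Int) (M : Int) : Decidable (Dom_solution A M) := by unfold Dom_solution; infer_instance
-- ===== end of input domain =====

-- B replaces A's sort + per-start while-loop suffix scans by a single pass counting residues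
-- mod M and taking the largest class size (faster). A sorts its argument in place; the
-- equivalence proved here is about the RETURN value only (B does not mutate its argument).


-- ===== PORT A =====
-- the inner 'while tmp <= max' loop; fuel is only a totality guard (each iteration either
-- consumes an occurrence — the suffix shrinks — or adds M ≥ 1 to tmp, so the chosen fuel
-- S.length + (mx + 1 - tmp).toNat + 1 is never exhausted on inputs admitted by Pre_)
def solWhile (S : List Int) (mx M : Int) : Nat → Int → Int → Int → Int
  | 0, _, _, tc => tc
  | fuel + 1, tmp, ti, tc =>
    if tmp ≤ mx then
      if 0 < PySem.List.count (PySem.List.slice S (some ti) none) tmp then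
        -- tmp_index = A[tmp_index:].index(tmp) + tmp_index + 1  (index exists: count > 0)
        solWhile S mx M fuel tmp
          (((PySem.List.index? (PySem.List.slice S (some ti) none) tmp).getD 0 : Int) + ti + 1)
          (tc + 1)
      else
        solWhile S mx M fuel (tmp + M) ti tc
    else tc

def solution (A : List Int) (M : Int) : Int :=
  let S := PySem.List.sorted A (fun x => x) false     -- A.sort()
  let mx := PySem.List.pyGetD S (-1) 0                -- max = A[-1]  (Pre_ excludes [])
  (PySem.List.pyRange 0 (S.length : Int) 1).foldl (fun count i =>
    let tmp := PySem.List.pyGetD S i 0                -- tmp = A[i]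
    let tc := solWhile S mx M (S.length + (mx + 1 - tmp).toNat + 1) tmp (i + 1) 1
    if tc > count then tc else count) 0

-- ===== PORT B =====
def solution_alt (A : List Int) (M : Int) : Int :=
  let freq := A.foldl (fun d a =>
    let r := PySem.Int.mod a M
    d.insert r (d.getD r 0 + 1)) PySem.Dict.empty
  (PySem.List.max? freq.values (fun v => v)).getD 0   -- max(freq.values())  (Pre_ excludes [])

-- ===== PRECONDITION & SPEC =====
-- Pre_ excludes the empty list (A raises IndexError at A[-1]) and M ≤ 0 (A's while loop never
-- terminates there: tmp never exceeds max). A returns on every input admitted here.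
def Pre_solution (A : List Int) (M : Int) : Prop := A ≠ [] ∧ 1 ≤ M
instance (A : List Int) (M : Int) : Decidable (Pre_solution A M) := by unfold Pre_solution; infer_instance
def pvWitness_solution : List Int × Int := ([3, 1, 5, 2, -4], 2)

def Spec_solution (A : List Int) (M : Int) (out : Int) : Prop := out = solution_alt A M
instance (A : List Int) (M : Int) (out : Int) : Decidable (Spec_solution A M out) := by unfold Spec_solution; infer_instance

-- ===== CLAIM (what is proved, stated in full; the proofs are below) =====
def Claim_equal_solution : Prop := ∀ (A : List Int) (M : Int), Dom_solution A M → Pre_solution A M → Spec_solution A M (solution A M)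

-- ===== LEMMAS AND PROOFS =====

-- membership test of the arithmetic progression started at tmp with step M
def progP (tmp M a : Int) : Bool := decide (tmp ≤ a) && decide (tmp % M = a % M)

lemma solWhile_eq (S : List Int) (mx M : Int) (hM : 1 ≤ M) (hmx : ∀ a ∈ S, a ≤ mx)
    (hs : S.Pairwise (· ≤ ·)) :
    ∀ (fuel : Nat) (tmp : Int) (j : Nat) (tc : Int),
      S.length - j + (mx + 1 - tmp).toNat + 1 ≤ fuel →
      solWhile S mx M fuel tmp (j : Int) tc
        = tc + (((S.drop j).countP (progP tmp M) : Nat) : Int) := by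
  intro fuel
  induction fuel with
  | zero => intro tmp j tc h; exact absurd h (by omega)
  | succ fuel ih =>
    intro tmp j tc h
    simp only [solWhile]
    rw [PySem.List.slice_from_natCast]
    by_cases htmp : tmp ≤ mx
    · rw [if_pos htmp, PySem.List.count_eq]
      set t := S.drop j with ht
      have htpair : t.Pairwise (· ≤ ·) := List.Pairwise.drop hs
      by_cases hc : 0 < t.count tmp
      · rw [if_pos hc]
        have hmem : tmp ∈ t := List.count_pos_iff.mp hc
        obtain ⟨p, hp⟩ := Option.isSome_iff_exists.mp
          ((PySem.List.index?_isSome_iff t tmp).mpr hmem)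
        obtain ⟨hplt, hpeq, hpmin⟩ := PySem.List.getElem_of_index?_eq_some hp
        rw [hp]
        have hidx : ((some p).getD 0 : Int) + (j : Int) + 1 = ((p + j + 1 : Nat) : Int) := by
          simp
        rw [hidx]
        have hjlen : p + j + 1 ≤ S.length := by
          have : t.length = S.length - j := by rw [ht, List.length_drop]
          omega
        have hfuel2 : S.length - (p + j + 1) + (mx + 1 - tmp).toNat + 1 ≤ fuel := by
          have : t.length = S.length - j := by rw [ht, List.length_drop]
          omega
        rw [ih tmp (p + j + 1) (tc + 1) hfuel2]
        have hdd : S.drop (p + j + 1) = t.drop (p + 1) := by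
          rw [ht, List.drop_drop]; congr 1; omega
        rw [hdd]
        -- countP over t splits as 1 (the first occurrence of tmp) + countP over the tail past it
        have hsplit : t.countP (progP tmp M)
            = (t.take (p + 1)).countP (progP tmp M) + (t.drop (p + 1)).countP (progP tmp M) := by
          conv_lhs => rw [← List.take_append_drop (p + 1) t]
          rw [List.countP_append]
        have htake : (t.take (p + 1)).countP (progP tmp M) = 1 := by
          rw [List.take_add_one, List.countP_append]
          have h0 : (t.take p).countP (progP tmp M) = 0 := by
            apply List.countP_eq_zero.mpr
            intro a ha
            obtain ⟨q, hq, rfl⟩ := List.mem_iff_getElem.mp ha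
            have hqlen : q < p := by
              have := hq; simp [List.length_take] at this; omega
            have hgt : (t.take p)[q] = t[q]'(by omega) := List.getElem_take
            have hne : t[q]'(by omega) ≠ tmp := hpmin q hqlen
            have hle : t[q]'(by omega) ≤ t[p] :=
              List.pairwise_iff_getElem.mp htpair q p (by omega) hplt hqlen
            rw [hgt]
            have : ¬ (tmp ≤ t[q]'(by omega)) := by rw [hpeq] at hle; omega
            simp [progP, this]
          rw [h0]
          have hsome : t[p]? = some (t[p]) := List.getElem?_eq_getElem hplt
          rw [hsome]
          simp [progP, hpeq]
        rw [hsplit, htake]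
        push_cast
        ring
      · rw [if_neg hc]
        have hnot : tmp ∉ t := by
          intro hmem; exact hc (List.count_pos_iff.mpr hmem)
        have hfuel2 : S.length - j + (mx + 1 - (tmp + M)).toNat + 1 ≤ fuel := by omega
        rw [ih (tmp + M) j tc hfuel2]
        have hmm : (tmp + M) % M = tmp % M := Int.add_emod_right tmp M
        have hcong : t.countP (progP (tmp + M) M) = t.countP (progP tmp M) := by
          apply List.countP_congr
          intro a ha
          have hne : a ≠ tmp := fun he => hnot (he ▸ ha)
          by_cases h1 : tmp % M = a % M
          · have hd : M ∣ a - tmp := by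
              have := (Int.emod_eq_emod_iff_emod_sub_eq_zero.mp h1.symm)
              exact Int.dvd_of_emod_eq_zero this
            have hiff : (tmp + M ≤ a) ↔ (tmp ≤ a) := by
              constructor
              · intro hle; omega
              · intro hle
                have hpos : 0 < a - tmp := by omega
                have := Int.le_of_dvd hpos hd
                omega
            have h2 : (tmp + M) % M = a % M := by rw [hmm]; exact h1
            simp [progP, h1, h2, hiff]
          · have h2 : ¬ ((tmp + M) % M = a % M) := by rw [hmm]; exact h1
            simp [progP, h1]
        rw [hcong]
    · rw [if_neg htmp]
      have h0 : (S.drop j).countP (progP tmp M) = 0 := by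
        apply List.countP_eq_zero.mpr
        intro a ha
        have : a ≤ mx := hmx a (List.mem_of_mem_drop ha)
        have : ¬ (tmp ≤ a) := by omega
        simp [progP, this]
      rw [h0]
      simp

-- x ≤ getLast for a ≤-sorted list
lemma le_getLast_of_pairwise (l : List Int) (h : l.Pairwise (· ≤ ·)) (x : Int) (hx : x ∈ l)
    (hne : l ≠ []) : x ≤ l.getLast hne := by
  rw [List.getLast_eq_getElem]
  obtain ⟨i, hi, rfl⟩ := List.mem_iff_getElem.mp hx
  rcases Nat.lt_or_ge i (l.length - 1) with h1 | h1
  · exact (List.pairwise_iff_getElem.mp h) i (l.length - 1) hi (by omega) h1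
  · have : i = l.length - 1 := by omega
    subst this; exact le_refl _

lemma if_max (c t : Int) : (if c < t then t else c) = max c t := by
  split_ifs <;> omega

lemma countP_split (S : List Int) (p : Int → Bool) (n : Nat) :
    S.countP p = (S.take n).countP p + (S.drop n).countP p := by
  conv_lhs => rw [← List.take_append_drop n S]
  rw [List.countP_append]

-- ===== VERDICT (by name: the statement is the Claim_ definition above) =====
theorem solution_spec : Claim_equal_solution := by
  intro A M _hDom hPre
  obtain ⟨hA, hM⟩ := hPre
  unfold Spec_solution
  simp only [solution, solution_alt]
  set S := PySem.List.sorted A (fun x => x) false with hSdef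
  have hperm : S.Perm A := PySem.List.sorted_perm ..
  have hpair : S.Pairwise (· ≤ ·) := by
    have := PySem.List.sorted_pairwise (xs := A) (key := fun x : Int => x)
    rw [← hSdef] at this; simpa using this
  have hSne : S ≠ [] := by
    intro h0
    rw [hSdef] at h0
    exact hA ((PySem.List.sorted_eq_nil_iff A (fun x => x) false).mp h0)
  rw [PySem.List.pyGetD_neg_one S 0 hSne]
  set mx := S.getLast hSne with hmxdef
  have hmx : ∀ a ∈ S, a ≤ mx := fun a ha => le_getLast_of_pairwise S hpair a ha hSne
  -- B side: the fold is the counter of the residues, its values are the class sizes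
  have hmod : ∀ a : Int, PySem.Int.mod a M = a % M :=
    fun a => PySem.Int.mod_eq_emod_of_pos (by omega)
  simp only [hmod]
  set R := A.map (fun a => a % M) with hRdef
  have hB : A.foldl (fun d a => d.insert (a % M) (d.getD (a % M) 0 + 1)) PySem.Dict.empty
      = PySem.Dict.counter R := by
    rw [hRdef, ← PySem.Dict.foldl_insert_getD_add_one_eq_counter, List.foldl_map]
  rw [hB]
  have hnd : (PySem.Dict.counter R).keys.Nodup := PySem.Dict.nodup_keys_counter ..
  have hvals : (PySem.Dict.counter R).values
      = (PySem.Set.ofList R).map (fun r => ((R.count r : Nat) : Int)) := by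
    rw [PySem.Dict.values_eq_map_keys _ hnd 0, PySem.Dict.keys_counter]
    simp only [PySem.Dict.getD_counter]
  rw [hvals]
  set V := (PySem.Set.ofList R).map (fun r => ((R.count r : Nat) : Int)) with hVdef
  obtain ⟨a0, ha0⟩ : ∃ a, a ∈ A := List.exists_mem_of_ne_nil A hA
  have hr0 : (a0 % M) ∈ PySem.Set.ofList R :=
    (PySem.Set.mem_ofList R (a0 % M)).mpr (by rw [hRdef]; exact List.mem_map_of_mem ha0)
  have hVne : V ≠ [] := List.ne_nil_of_mem (List.mem_map_of_mem hr0)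
  obtain ⟨m, hm⟩ : ∃ m, PySem.List.max? V (fun v => v) = some m := by
    cases hmm : PySem.List.max? V (fun v => v) with
    | none => exact absurd ((PySem.List.max?_eq_none_iff V _).mp hmm) hVne
    | some m => exact ⟨m, rfl⟩
  have hmmem : m ∈ V := PySem.List.max?_mem hm
  have hmmax : ∀ y ∈ V, y ≤ m := by
    have := PySem.List.max?_isMax hm; simpa using this
  rw [hm]
  -- counts over S of a residue class
  have hcntS : ∀ r : Int, R.count r = S.countP (fun a => decide (a % M = r)) := by
    intro r
    rw [hRdef, List.count_eq_countP, List.countP_map]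
    have he : ((fun x : Int => x == r) ∘ fun a : Int => a % M)
        = fun a : Int => decide (a % M = r) := by
      funext a; by_cases h : a % M = r <;> simp [h]
    rw [he, ← hperm.countP_eq]
  -- A side: rewrite the loop into a fold of max over per-start chain lengths
  rw [PySem.List.pyRange_zero_nat, List.foldl_map]
  simp only [PySem.List.pyGetD_natCast]
  simp only [gt_iff_lt, if_max]
  rw [show (List.range S.length).foldl (fun c k =>
        max c (solWhile S mx M (S.length + (mx + 1 - S.getD k 0).toNat + 1)
          (S.getD k 0) ((k : Int) + 1) 1)) 0
      = ((List.range S.length).map (fun k =>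
          solWhile S mx M (S.length + (mx + 1 - S.getD k 0).toNat + 1)
            (S.getD k 0) ((k : Int) + 1) 1)).foldl max 0 from (List.foldl_map ..).symm]
  set F : Nat → Int := fun k =>
    solWhile S mx M (S.length + (mx + 1 - S.getD k 0).toNat + 1)
      (S.getD k 0) ((k : Int) + 1) 1 with hFdef
  set L := (List.range S.length).map F with hLdef
  -- each F k is 1 + (count of the progression members past position k)
  have hFk : ∀ (k : Nat) (hk : k < S.length),
      F k = 1 + (((S.drop (k + 1)).countP (progP (S[k]'hk) M) : Nat) : Int) := by
    intro k hk
    rw [hFdef]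
    simp only
    rw [List.getD_eq_getElem S 0 hk]
    rw [show ((k : Int) + 1) = ((k + 1 : Nat) : Int) by push_cast; ring]
    exact solWhile_eq S mx M hM hmx hpair _ _ (k + 1) 1 (by omega)
  -- upper bound: every chain length is at most its class size
  have hub : ∀ k, k < S.length → F k ≤ m := by
    intro k hk
    have hvS : S[k] ∈ S := List.getElem_mem hk
    have hvA : S[k] ∈ A := hperm.mem_iff.mp hvS
    have hrR : (S[k] % M) ∈ R := by rw [hRdef]; exact List.mem_map_of_mem hvA
    have hrmem : ((R.count (S[k] % M) : Nat) : Int) ∈ V :=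
      List.mem_map_of_mem ((PySem.Set.mem_ofList R _).mpr hrR)
    have hle : ((R.count (S[k] % M) : Nat) : Int) ≤ m := hmmax _ hrmem
    have h1 : (S.drop (k + 1)).countP (progP (S[k]) M)
        ≤ (S.drop (k + 1)).countP (fun a => decide (a % M = S[k] % M)) := by
      apply List.countP_mono_left
      intro a _ hp
      simp only [progP, Bool.and_eq_true, decide_eq_true_eq] at hp
      simp [hp.2.symm]
    have h2 : 0 < (S.take (k + 1)).countP (fun a => decide (a % M = S[k] % M)) := by
      apply List.countP_pos_iff.mpr
      refine ⟨S[k], ?_, by simp⟩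
      have hkk : k < (S.take (k + 1)).length := by simp [List.length_take]; omega
      have : (S.take (k + 1))[k]'hkk = S[k] := List.getElem_take
      exact this ▸ List.getElem_mem hkk
    have hsplit := countP_split S (fun a => decide (a % M = S[k] % M)) (k + 1)
    have hc := hcntS (S[k] % M)
    rw [hFk k hk]
    omega
  -- every class size is attained: start at the first element of the class in S
  have hhit : ∀ y ∈ V, ∃ k, k < S.length ∧ F k = y := by
    intro y hy
    obtain ⟨r, hrmem, rfl⟩ := List.mem_map.mp hy
    have hrR : r ∈ R := (PySem.Set.mem_ofList R r).mp hrmem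
    obtain ⟨a1, ha1A, ha1r⟩ := List.mem_map.mp (hRdef ▸ hrR)
    have ha1S : a1 ∈ S := hperm.mem_iff.mpr ha1A
    have hex : ∃ x ∈ S, (fun a : Int => decide (a % M = r)) x = true := ⟨a1, ha1S, by simp [ha1r]⟩
    have hilt : S.findIdx (fun a : Int => decide (a % M = r)) < S.length :=
      List.findIdx_lt_length_of_exists hex
    set i := S.findIdx (fun a : Int => decide (a % M = r)) with hidef
    have hpi : S[i]'hilt % M = r := by
      have := List.findIdx_getElem (w := hilt)
      simpa using this
    refine ⟨i, hilt, ?_⟩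
    rw [hFk i hilt]
    have htake1 : (S.take (i + 1)).countP (fun a => decide (a % M = r)) = 1 := by
      rw [List.take_add_one, List.countP_append]
      have h0 : (S.take i).countP (fun a => decide (a % M = r)) = 0 := by
        apply List.countP_eq_zero.mpr
        intro a ha
        obtain ⟨q, hq, rfl⟩ := List.mem_iff_getElem.mp ha
        have hqi : q < i := by simp [List.length_take] at hq; omega
        have hqS : q < S.length := by omega
        have hgt : (S.take i)[q] = S[q]'hqS := List.getElem_take
        have := List.not_of_lt_findIdx (xs := S) (p := fun a : Int => decide (a % M = r))
          (by omega : q < S.findIdx (fun a : Int => decide (a % M = r)))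
        rw [hgt]
        simpa using this
      rw [h0, List.getElem?_eq_getElem hilt]
      simp [hpi]
    have hcong : (S.drop (i + 1)).countP (progP (S[i]'hilt) M)
        = (S.drop (i + 1)).countP (fun a => decide (a % M = r)) := by
      apply List.countP_congr
      intro a ha
      have hge : S[i]'hilt ≤ a := by
        obtain ⟨q, hq, rfl⟩ := List.mem_iff_getElem.mp ha
        have hqS : i + 1 + q < S.length := by simp [List.length_drop] at hq; omega
        have hgd : (S.drop (i + 1))[q] = S[i + 1 + q]'hqS := List.getElem_drop ..
        rw [hgd]
        exact (List.pairwise_iff_getElem.mp hpair) i (i + 1 + q) hilt hqS (by omega)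
      by_cases h1 : a % M = r
      · have h2 : S[i]'hilt % M = a % M := by rw [hpi, h1]
        simp [progP, h1, h2, hge]
      · have h2 : ¬ (S[i]'hilt % M = a % M) := by
          rw [hpi]; intro he; exact h1 he.symm
        simp [progP, h1, h2]
    have hsplit := countP_split S (fun a => decide (a % M = r)) (i + 1)
    have hc := hcntS r
    rw [hcong]
    omega
  -- both sides are the largest class size
  have hL2 := (PySem.List.le_foldl_max L 0).2
  have hLmem := PySem.List.foldl_max_mem L 0
  obtain ⟨k0, hk0, hk0eq⟩ := hhit m hmmem
  have hmem0 : F k0 ∈ L := by rw [hLdef]; exact List.mem_map_of_mem (List.mem_range.mpr hk0)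
  have h1 : m ≤ L.foldl max 0 := hk0eq ▸ hL2 _ hmem0
  have hm1 : 1 ≤ m := by
    rw [← hk0eq, hFk k0 hk0]; omega
  have hgoal : L.foldl max 0 = m := by
    rcases hLmem with h0 | hmem
    · have h0' : L.foldl max 0 = 0 := by rw [hLdef]; exact h0
      omega
    · obtain ⟨k1, hk1r, hk1eq⟩ := List.mem_map.mp (hLdef ▸ hmem)
      have hub1 := hub k1 (List.mem_range.mp hk1r)
      have hk1eq' : F k1 = L.foldl max 0 := by rw [hLdef]; exact hk1eq
      omega
  exact hgoal
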